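-- pv_equiv track=rewrite | github.com/matheus489/port-lineup-analytics | src/etl/medallion_pipeline.py | _classify_ship_type
-- ===== SOURCE A (Python) =====
-- def _classify_ship_type(ship_name: str) -> str:
--     """Classify ship type based on name"""
--     ship_name = str(ship_name).upper()
--
--     if any(keyword in ship_name for keyword in ['BULK', 'GRAIN', 'CARGO']):
--         return 'CARGA_GERAL'
--     elif any(keyword in ship_name for keyword in ['CONTAINER', 'BOX']):
--         return 'CONTAINER'
--     elif any(keyword in ship_name for keyword in ['TANKER', 'OIL', 'PETROLEUM']):
--         return 'TANQUE'
--     elif any(keyword in ship_name for keyword in ['RO-RO', 'FERRY']):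
--         return 'RO-RO'
--     else:
--         return 'OUTROS'
-- ===== SOURCE B (Python) =====
-- _KEYWORD_LABEL = {
--     'BULK': 'CARGA_GERAL', 'GRAIN': 'CARGA_GERAL', 'CARGO': 'CARGA_GERAL',
--     'CONTAINER': 'CONTAINER', 'BOX': 'CONTAINER',
--     'TANKER': 'TANQUE', 'OIL': 'TANQUE', 'PETROLEUM': 'TANQUE',
--     'RO-RO': 'RO-RO', 'FERRY': 'RO-RO',
-- }
-- _PRIORITY = ['CARGA_GERAL', 'CONTAINER', 'TANQUE', 'RO-RO']
--
-- def _classify_ship_type(ship_name: str) -> str: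
--     """Classify ship type: collect ALL labels whose keyword occurs, then pick the highest-priority one."""
--     s = str(ship_name).upper()
--     hits = {label for keyword, label in _KEYWORD_LABEL.items() if keyword in s}
--     return next((label for label in _PRIORITY if label in hits), 'OUTROS')
-- ===== Notes on version B (the rewrite author's own statement) =====
-- stated objective: alternative
-- what changed: Instead of a short-circuiting if/elif chain over grouped keyword lists, B evaluates every keyword of a flat keyword-to-label map in one pass, collects the full set of matching labels, and resolves the winner in a second pass over a priority list.
import Mathlib
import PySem

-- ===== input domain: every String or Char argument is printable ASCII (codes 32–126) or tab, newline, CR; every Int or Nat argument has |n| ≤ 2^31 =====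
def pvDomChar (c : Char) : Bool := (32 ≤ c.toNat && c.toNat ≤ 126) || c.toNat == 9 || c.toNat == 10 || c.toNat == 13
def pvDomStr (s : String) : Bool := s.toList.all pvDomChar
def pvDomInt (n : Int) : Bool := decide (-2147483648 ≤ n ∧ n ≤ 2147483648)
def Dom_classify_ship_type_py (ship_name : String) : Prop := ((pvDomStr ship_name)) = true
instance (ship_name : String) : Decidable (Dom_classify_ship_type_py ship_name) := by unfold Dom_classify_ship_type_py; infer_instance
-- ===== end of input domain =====

-- B replaces A's short-circuiting if/elif chain by: collect the full set of labels whose keyword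
-- occurs (one pass over a flat keyword->label map), then resolve by a priority list (alternative; same cost).

-- ===== PORT A =====
-- literal transliteration of A's if/elif chain ('kw in s' = PySem.Str.isIn)
def classify_ship_type_py (ship_name : String) : String :=
  let s := PySem.Str.upper ship_name
  if ["BULK", "GRAIN", "CARGO"].any (fun k => PySem.Str.isIn k s) then "CARGA_GERAL"
  else if ["CONTAINER", "BOX"].any (fun k => PySem.Str.isIn k s) then "CONTAINER"
  else if ["TANKER", "OIL", "PETROLEUM"].any (fun k => PySem.Str.isIn k s) then "TANQUE"
  else if ["RO-RO", "FERRY"].any (fun k => PySem.Str.isIn k s) then "RO-RO"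
  else "OUTROS"

-- ===== PORT B =====
-- the flat keyword -> label dict, in insertion order
def kwLabel : PySem.Dict String String :=
  PySem.Dict.ofList [("BULK", "CARGA_GERAL"), ("GRAIN", "CARGA_GERAL"), ("CARGO", "CARGA_GERAL"),
   ("CONTAINER", "CONTAINER"), ("BOX", "CONTAINER"),
   ("TANKER", "TANQUE"), ("OIL", "TANQUE"), ("PETROLEUM", "TANQUE"),
   ("RO-RO", "RO-RO"), ("FERRY", "RO-RO")]

def priorityLabels : List String := ["CARGA_GERAL", "CONTAINER", "TANQUE", "RO-RO"]

def classify_ship_type_py_alt (ship_name : String) : String :=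
  let s := PySem.Str.upper ship_name
  -- hits = {label for keyword, label in _KEYWORD_LABEL.items() if keyword in s}
  let hits : PySem.Set String :=
    PySem.Set.ofList (((PySem.Dict.items kwLabel).filter (fun p => PySem.Str.isIn p.1 s)).map Prod.snd)
  -- next((label for label in _PRIORITY if label in hits), 'OUTROS')
  (priorityLabels.find? (fun label => PySem.Set.contains hits label)).getD "OUTROS"

-- ===== PRECONDITION & SPEC =====
def Spec_classify_ship_type_py (ship_name : String) (out : String) : Prop := out = classify_ship_type_py_alt ship_name
instance (ship_name : String) (out : String) : Decidable (Spec_classify_ship_type_py ship_name out) := by unfold Spec_classify_ship_type_py; infer_instance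

-- ===== CLAIM =====
def Claim_equal_classify_ship_type_py : Prop := ∀ (ship_name : String), Dom_classify_ship_type_py ship_name → Spec_classify_ship_type_py ship_name (classify_ship_type_py ship_name)

-- ===== LEMMAS AND PROOFS =====

-- ===== VERDICT =====
theorem classify_ship_type_py_spec : Claim_equal_classify_ship_type_py := by
  intro s _
  unfold Spec_classify_ship_type_py classify_ship_type_py classify_ship_type_py_alt priorityLabels
  have hitems : PySem.Dict.items kwLabel =
      [("BULK", "CARGA_GERAL"), ("GRAIN", "CARGA_GERAL"), ("CARGO", "CARGA_GERAL"),
       ("CONTAINER", "CONTAINER"), ("BOX", "CONTAINER"),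
       ("TANKER", "TANQUE"), ("OIL", "TANQUE"), ("PETROLEUM", "TANQUE"),
       ("RO-RO", "RO-RO"), ("FERRY", "RO-RO")] := by decide
  rw [hitems]
  simp only [List.any_cons, List.any_nil, List.filter_cons, List.filter_nil, Bool.or_false]
  generalize PySem.Str.isIn "BULK" (PySem.Str.upper s) = b1
  generalize PySem.Str.isIn "GRAIN" (PySem.Str.upper s) = b2
  generalize PySem.Str.isIn "CARGO" (PySem.Str.upper s) = b3
  generalize PySem.Str.isIn "CONTAINER" (PySem.Str.upper s) = b4
  generalize PySem.Str.isIn "BOX" (PySem.Str.upper s) = b5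
  generalize PySem.Str.isIn "TANKER" (PySem.Str.upper s) = b6
  generalize PySem.Str.isIn "OIL" (PySem.Str.upper s) = b7
  generalize PySem.Str.isIn "PETROLEUM" (PySem.Str.upper s) = b8
  generalize PySem.Str.isIn "RO-RO" (PySem.Str.upper s) = b9
  generalize PySem.Str.isIn "FERRY" (PySem.Str.upper s) = b10
  revert b1 b2 b3 b4 b5 b6 b7 b8 b9 b10
  decide
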